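-- pv_equiv track=rewrite | github.com/elricbk/vim-cpp-fix-includes | ftplugin/cpp/vim_cpp_fix_includes.py | extract_cpp_identifier
-- ===== SOURCE A (Python) =====
-- def extract_cpp_identifier(l, col):
--     is_name_part = lambda c: c == ':' or c == '_' or c.isalnum()
--     if col < 0 or col > len(l) - 1 or not is_name_part(l[col]):
--         return None
--     i = col - 1
--     while i >= 0 and is_name_part(l[i]):
--         i -= 1
--     j = col + 1
--     while j < len(l) and is_name_part(l[j]):
--         j += 1
--     return l[i + 1:j]
-- ===== SOURCE B (Python) =====
-- def extract_cpp_identifier(l, col):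
--     is_name_part = lambda c: c == ':' or c == '_' or c.isalnum()
--     spans = []
--     start = None
--     for idx, ch in enumerate(l):
--         if is_name_part(ch):
--             if start is None:
--                 start = idx
--         else:
--             if start is not None:
--                 spans.append((start, idx))
--                 start = None
--     if start is not None:
--         spans.append((start, len(l)))
--     for s, e in spans:
--         if s <= col < e:
--             return l[s:e]
--     return None
-- ===== Notes on version B (the rewrite author's own statement) =====
-- stated objective: alternative
-- what changed: B tokenizes the whole line into maximal (start,end) runs of name characters in one forward enumerate pass and then selects the run containing col, instead of A's expanding outward from col with two index-arithmetic while loops.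
import Mathlib
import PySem

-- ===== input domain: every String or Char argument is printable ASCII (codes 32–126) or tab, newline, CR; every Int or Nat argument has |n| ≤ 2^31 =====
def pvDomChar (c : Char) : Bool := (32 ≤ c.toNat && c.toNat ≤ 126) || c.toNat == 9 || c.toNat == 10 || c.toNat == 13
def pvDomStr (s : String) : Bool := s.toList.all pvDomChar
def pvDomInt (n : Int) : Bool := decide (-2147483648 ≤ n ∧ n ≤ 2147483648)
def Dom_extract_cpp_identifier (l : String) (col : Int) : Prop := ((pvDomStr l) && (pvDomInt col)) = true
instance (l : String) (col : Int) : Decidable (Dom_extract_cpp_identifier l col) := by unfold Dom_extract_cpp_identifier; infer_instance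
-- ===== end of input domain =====

-- B replaces A's expand-around-col while-loops by a one-pass tokenization of the
-- line into maximal name-character runs followed by a lookup of the run containing col
-- (alternative decomposition; same return value everywhere, same O(n) cost).

-- ===== PORT A =====

-- is_name_part(c)
def pvIsName (c : Char) : Bool := c == ':' || c == '_' || PySem.Chars.isalnum c

-- is_name_part(l[i]) (l[i] via pyGet?; False where Python would raise — never reached by A)
def pvAGet (cs : List Char) (i : Int) : Bool := (PySem.List.pyGet? cs i).elim false pvIsName

-- loop condition of A's left while loop: i >= 0 and is_name_part(l[i])
def pvN (cs : List Char) (i : Int) : Bool := decide (0 ≤ i) && pvAGet cs i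

-- loop condition of A's right while loop: j < len(l) and is_name_part(l[j])
def pvM (cs : List Char) (j : Int) : Bool := decide (j < PySem.List.len cs) && pvAGet cs j

-- while i >= 0 and is_name_part(l[i]): i -= 1
def pvALeft (cs : List Char) (i : Int) : Int :=
  if h : pvN cs i = true then pvALeft cs (i - 1) else i
termination_by (i + 1).toNat
decreasing_by
  have : 0 ≤ i := by
    simp only [pvN, Bool.and_eq_true, decide_eq_true_eq] at h
    exact h.1
  omega

-- while j < len(l) and is_name_part(l[j]): j += 1
def pvARight (cs : List Char) (j : Int) : Int :=
  if h : pvM cs j = true then pvARight cs (j + 1) else j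
termination_by (PySem.List.len cs - j).toNat
decreasing_by
  have : j < PySem.List.len cs := by
    simp only [pvM, Bool.and_eq_true, decide_eq_true_eq] at h
    exact h.1
  simp only [PySem.List.len_eq] at this ⊢
  omega

def extract_cpp_identifier (l : String) (col : Int) : Option String :=
  let cs := l.toList
  if col < 0 ∨ col > PySem.List.len cs - 1 ∨ ¬ (pvAGet cs col = true) then none
  else
    let i := pvALeft cs (col - 1)
    let j := pvARight cs (col + 1)
    some (String.ofList (PySem.List.slice cs (some (i + 1)) (some j)))

-- ===== PORT B =====

-- body of B's tokenizing for-loop over enumerate(l)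
def pvBStep (st : List (Int × Int) × Option Int) (p : Int × Char) : List (Int × Int) × Option Int :=
  if pvIsName p.2 then
    match st.2 with
    | none => (st.1, some p.1)
    | some s => (st.1, some s)
  else
    match st.2 with
    | some s => (st.1 ++ [(s, p.1)], none)
    | none => (st.1, none)

-- B's selection loop: first span with s <= col < e
def pvBFind (col : Int) : List (Int × Int) → Option (Int × Int)
  | [] => none
  | (s, e) :: rest => if s ≤ col ∧ col < e then some (s, e) else pvBFind col rest

def extract_cpp_identifier_alt (l : String) (col : Int) : Option String :=
  let cs := l.toList
  let st := (PySem.List.enumerate cs 0).foldl pvBStep ([], none)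
  let spans := match st.2 with
    | some s => st.1 ++ [(s, PySem.List.len cs)]
    | none => st.1
  match pvBFind col spans with
  | some (s, e) => some (String.ofList (PySem.List.slice cs (some s) (some e)))
  | none => none

-- ===== PRECONDITION & SPEC =====
def Spec_extract_cpp_identifier (l : String) (col : Int) (out : Option String) : Prop := out = extract_cpp_identifier_alt l col
instance (l : String) (col : Int) (out : Option String) : Decidable (Spec_extract_cpp_identifier l col out) := by unfold Spec_extract_cpp_identifier; infer_instance

-- ===== CLAIM (what is proved, stated in full; the proofs are below) =====
def Claim_equal_extract_cpp_identifier : Prop := ∀ (l : String) (col : Int), Dom_extract_cpp_identifier l col → Spec_extract_cpp_identifier l col (extract_cpp_identifier l col)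

-- ===== LEMMAS AND PROOFS =====

-- pvN basics ------------------------------------------------------------

theorem pvN_bounds (cs : List Char) (k : Int) (h : pvN cs k = true) :
    0 ≤ k ∧ k < cs.length := by
  simp only [pvN, Bool.and_eq_true, decide_eq_true_eq] at h
  obtain ⟨h0, hg⟩ := h
  refine ⟨h0, ?_⟩
  by_contra hk
  simp only [pvAGet] at hg
  rw [(PySem.List.pyGet?_eq_none_iff cs k).2 (by simp [PySem.Raise.InRange]; omega)] at hg
  simp [Option.elim] at hg

theorem pvN_stable (cs : List Char) (c : Char) (k : Int) (hk : k < cs.length) :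
    pvN (cs ++ [c]) k = pvN cs k := by
  by_cases h0 : 0 ≤ k
  · simp only [pvN, pvAGet, PySem.List.pyGet?_of_nonneg _ h0]
    rw [List.getElem?_append_left (by omega)]
  · simp [pvN, h0]

theorem pvN_last (cs : List Char) (c : Char) :
    pvN (cs ++ [c]) (cs.length : Int) = pvIsName c := by
  simp [pvN, pvAGet]

theorem pvN_ge_false (cs : List Char) (k : Int) (hk : (cs.length : Int) ≤ k) :
    pvN cs k = false := by
  by_cases h0 : 0 ≤ k
  · simp only [pvN, pvAGet]
    rw [(PySem.List.pyGet?_eq_none_iff cs k).2 (by simp [PySem.Raise.InRange]; omega)]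
    simp
  · simp [pvN, h0]

-- A's loop characterizations --------------------------------------------

theorem pvALeft_spec (cs : List Char) (i : Int) :
    pvALeft cs i ≤ i ∧ (∀ k : Int, pvALeft cs i < k → k ≤ i → pvN cs k = true) ∧
      pvN cs (pvALeft cs i) = false := by
  fun_induction pvALeft cs i with
  | case1 i h ih =>
    obtain ⟨h1, h2, h3⟩ := ih
    refine ⟨by omega, ?_, h3⟩
    intro k hk1 hk2
    rcases eq_or_lt_of_le hk2 with rfl | hlt
    · exact h
    · exact h2 k hk1 (by omega)
  | case2 i h =>
    exact ⟨le_refl _, fun k hk1 hk2 => absurd hk1 (by omega), by simpa using h⟩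

theorem pvARight_spec (cs : List Char) (j : Int) :
    j ≤ pvARight cs j ∧ (∀ k : Int, j ≤ k → k < pvARight cs j → pvM cs k = true) ∧
      pvM cs (pvARight cs j) = false := by
  fun_induction pvARight cs j with
  | case1 j h ih =>
    obtain ⟨h1, h2, h3⟩ := ih
    refine ⟨by omega, ?_, h3⟩
    intro k hk1 hk2
    rcases eq_or_lt_of_le hk1 with rfl | hlt
    · exact h
    · exact h2 k (by omega) hk2
  | case2 j h =>
    exact ⟨le_refl _, fun k hk1 hk2 => absurd hk1 (by omega), by simpa using h⟩

theorem pvM_of_pvN (cs : List Char) (k : Int) (h : pvN cs k = true) : pvM cs k = true := by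
  have hb := pvN_bounds cs k h
  simp only [pvN, Bool.and_eq_true, decide_eq_true_eq] at h
  simp only [pvM, Bool.and_eq_true, decide_eq_true_eq, PySem.List.len_eq]
  exact ⟨hb.2, h.2⟩

theorem pvN_of_pvM (cs : List Char) (k : Int) (h0 : 0 ≤ k) (h : pvM cs k = true) :
    pvN cs k = true := by
  simp only [pvM, Bool.and_eq_true, decide_eq_true_eq] at h
  simp only [pvN, Bool.and_eq_true, decide_eq_true_eq]
  exact ⟨h0, h.2⟩

-- B's fold invariant ----------------------------------------------------

def pvInv (cs : List Char) (st : List (Int × Int) × Option Int) : Prop :=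
  (∀ p ∈ st.1, 0 ≤ p.1 ∧ p.1 < p.2 ∧ p.2 < (cs.length : Int) ∧
      (∀ k : Int, p.1 ≤ k → k < p.2 → pvN cs k = true) ∧
      (p.1 = 0 ∨ pvN cs (p.1 - 1) = false) ∧ pvN cs p.2 = false) ∧
  (∀ k : Int, pvN cs k = true →
      (∃ p ∈ st.1, p.1 ≤ k ∧ k < p.2) ∨ (∃ s, st.2 = some s ∧ s ≤ k)) ∧
  (∀ s, st.2 = some s → 0 ≤ s ∧ s < (cs.length : Int) ∧
      (∀ k : Int, s ≤ k → k < (cs.length : Int) → pvN cs k = true) ∧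
      (s = 0 ∨ pvN cs (s - 1) = false)) ∧
  (st.2 = none → cs = [] ∨ pvN cs ((cs.length : Int) - 1) = false)

theorem pvFold_inv (cs : List Char) :
    pvInv cs ((PySem.List.enumerate cs 0).foldl pvBStep ([], none)) := by
  induction cs using List.reverseRecOn with
  | nil =>
    refine ⟨by simp [PySem.List.enumerate], ?_, by simp [PySem.List.enumerate], by simp⟩
    intro k hk
    have := pvN_bounds _ _ hk
    simp at this; omega
  | append_singleton ds c ih =>
    rw [PySem.List.enumerate_append, List.foldl_append]
    set st := (PySem.List.enumerate ds 0).foldl pvBStep ([], none) with hst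
    obtain ⟨hsp, hcov, hopen, hnone⟩ := ih
    simp only [PySem.List.enumerate_cons, PySem.List.enumerate_nil, List.foldl_cons,
    List.foldl_nil, zero_add]
    have hlen : ((ds ++ [c]).length : Int) = (ds.length : Int) + 1 := by simp
    -- facts used in every branch
    have hspan : ∀ p ∈ st.1, 0 ≤ p.1 ∧ p.1 < p.2 ∧ p.2 < ((ds ++ [c]).length : Int) ∧
        (∀ k : Int, p.1 ≤ k → k < p.2 → pvN (ds ++ [c]) k = true) ∧
        (p.1 = 0 ∨ pvN (ds ++ [c]) (p.1 - 1) = false) ∧ pvN (ds ++ [c]) p.2 = false := by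
      intro p hp
      obtain ⟨a1, a2, a3, a4, a5, a6⟩ := hsp p hp
      refine ⟨a1, a2, by omega, ?_, ?_, ?_⟩
      · intro k hk1 hk2
        rw [pvN_stable ds c k (by omega)]; exact a4 k hk1 hk2
      · rcases a5 with h | h
        · exact Or.inl h
        · exact Or.inr (by rw [pvN_stable ds c _ (by omega)]; exact h)
      · rw [pvN_stable ds c _ (by omega)]; exact a6
    by_cases hc : pvIsName c = true
    · -- new char is a name character
      cases hs2 : st.2 with
      | none =>
        simp only [pvBStep, hc, reduceIte, hs2]
        refine ⟨hspan, ?_, ?_, by simp⟩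
        · intro k hk
          have hb := pvN_bounds _ _ hk
          rw [hlen] at hb
          by_cases hke : k = (ds.length : Int)
          · exact Or.inr ⟨(ds.length : Int), rfl, by omega⟩
          · have hk' : pvN ds k = true := by
              rw [← pvN_stable ds c k (by omega)]; exact hk
            rcases hcov k hk' with ⟨p, hp, hpk⟩ | ⟨s, hss, _⟩
            · exact Or.inl ⟨p, hp, hpk⟩
            · rw [hs2] at hss; exact absurd hss (by simp)
        · intro s hs
          cases hs
          refine ⟨by positivity, by omega, ?_, ?_⟩
          · intro k hk1 hk2
            have hke : k = (ds.length : Int) := by omega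
            subst hke
            rw [pvN_last]; exact hc
          · rcases hnone hs2 with h | h
            · subst h; exact Or.inl (by simp)
            · by_cases hd : ds = []
              · subst hd; exact Or.inl (by simp)
              · refine Or.inr ?_
                have hdl : (0:Int) < ds.length := by
                  have := List.length_pos_iff.2 hd; omega
                rw [pvN_stable ds c _ (by omega)]
                exact h
      | some s =>
        simp only [pvBStep, hc, reduceIte, hs2]
        obtain ⟨b1, b2, b3, b4⟩ := hopen s hs2
        refine ⟨hspan, ?_, ?_, by simp⟩
        · intro k hk
          have hb := pvN_bounds _ _ hk
          rw [hlen] at hb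
          by_cases hke : k = (ds.length : Int)
          · exact Or.inr ⟨s, rfl, by omega⟩
          · have hk' : pvN ds k = true := by
              rw [← pvN_stable ds c k (by omega)]; exact hk
            rcases hcov k hk' with ⟨p, hp, hpk⟩ | ⟨s', hss, hsk⟩
            · exact Or.inl ⟨p, hp, hpk⟩
            · rw [hs2] at hss
              cases hss
              exact Or.inr ⟨s, rfl, hsk⟩
        · intro s' hs'
          cases hs'
          refine ⟨b1, by omega, ?_, ?_⟩
          · intro k hk1 hk2
            by_cases hke : k = (ds.length : Int)
            · subst hke; rw [pvN_last]; exact hc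
            · rw [pvN_stable ds c k (by omega)]
              exact b3 k hk1 (by omega)
          · rcases b4 with h | h
            · exact Or.inl h
            · exact Or.inr (by rw [pvN_stable ds c _ (by omega)]; exact h)
    · -- new char is not a name character
      have hc' : pvIsName c = false := by simpa using hc
      cases hs2 : st.2 with
      | none =>
        simp only [pvBStep, hc', Bool.false_eq_true, reduceIte, hs2]
        refine ⟨hspan, ?_, by simp, ?_⟩
        · intro k hk
          have hb := pvN_bounds _ _ hk
          rw [hlen] at hb
          by_cases hke : k = (ds.length : Int)
          · subst hke; rw [pvN_last] at hk; simp [hc'] at hk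
          · have hk' : pvN ds k = true := by
              rw [← pvN_stable ds c k (by omega)]; exact hk
            rcases hcov k hk' with ⟨p, hp, hpk⟩ | ⟨s', hss, _⟩
            · exact Or.inl ⟨p, hp, hpk⟩
            · rw [hs2] at hss; exact absurd hss (by simp)
        · intro _
          refine Or.inr ?_
          have : ((ds ++ [c]).length : Int) - 1 = (ds.length : Int) := by rw [hlen]; ring
          rw [this, pvN_last]; exact hc'
      | some s =>
        simp only [pvBStep, hc', Bool.false_eq_true, reduceIte, hs2]
        obtain ⟨b1, b2, b3, b4⟩ := hopen s hs2
        refine ⟨?_, ?_, by simp, ?_⟩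
        · intro p hp
          rw [List.mem_append] at hp
          rcases hp with hp | hp
          · exact hspan p hp
          · simp only [List.mem_singleton] at hp
            subst hp
            refine ⟨b1, by omega, by omega, ?_, ?_, ?_⟩
            · intro k hk1 hk2
              rw [pvN_stable ds c k (by omega)]
              exact b3 k hk1 (by omega)
            · rcases b4 with h | h
              · exact Or.inl h
              · exact Or.inr (by rw [pvN_stable ds c _ (by omega)]; exact h)
            · rw [pvN_last]; exact hc'
        · intro k hk
          have hb := pvN_bounds _ _ hk
          rw [hlen] at hb
          by_cases hke : k = (ds.length : Int)
          · subst hke; rw [pvN_last] at hk; simp [hc'] at hk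
          · have hk' : pvN ds k = true := by
              rw [← pvN_stable ds c k (by omega)]; exact hk
            rcases hcov k hk' with ⟨p, hp, hpk⟩ | ⟨s', hss, hsk⟩
            · exact Or.inl ⟨p, List.mem_append_left _ hp, hpk⟩
            · rw [hs2] at hss
              cases hss
              refine Or.inl ⟨(s, (ds.length : Int)), List.mem_append_right _ (by simp), hsk, by omega⟩
        · intro _
          refine Or.inr ?_
          have : ((ds ++ [c]).length : Int) - 1 = (ds.length : Int) := by rw [hlen]; ring
          rw [this, pvN_last]; exact hc'

-- final span list: every span is a maximal name run and every name position is covered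
def pvSpanOk (cs : List Char) (p : Int × Int) : Prop :=
  0 ≤ p.1 ∧ p.1 < p.2 ∧ p.2 ≤ (cs.length : Int) ∧
  (∀ k : Int, p.1 ≤ k → k < p.2 → pvN cs k = true) ∧
  (p.1 = 0 ∨ pvN cs (p.1 - 1) = false) ∧
  (p.2 = (cs.length : Int) ∨ pvN cs p.2 = false)

theorem pvSpans_spec (cs : List Char) :
    (∀ p ∈ (match ((PySem.List.enumerate cs 0).foldl pvBStep ([], none)).2 with
        | some s => ((PySem.List.enumerate cs 0).foldl pvBStep ([], none)).1 ++ [(s, PySem.List.len cs)]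
        | none => ((PySem.List.enumerate cs 0).foldl pvBStep ([], none)).1),
      pvSpanOk cs p) ∧
    (∀ k : Int, pvN cs k = true →
      ∃ p ∈ (match ((PySem.List.enumerate cs 0).foldl pvBStep ([], none)).2 with
        | some s => ((PySem.List.enumerate cs 0).foldl pvBStep ([], none)).1 ++ [(s, PySem.List.len cs)]
        | none => ((PySem.List.enumerate cs 0).foldl pvBStep ([], none)).1),
        p.1 ≤ k ∧ k < p.2) := by
  obtain ⟨hsp, hcov, hopen, _⟩ := pvFold_inv cs
  set st := (PySem.List.enumerate cs 0).foldl pvBStep ([], none) with hst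
  cases hs2 : st.2 with
  | none =>
    simp only
    constructor
    · intro p hp
      obtain ⟨a1, a2, a3, a4, a5, a6⟩ := hsp p hp
      exact ⟨a1, a2, by omega, a4, a5, Or.inr a6⟩
    · intro k hk
      rcases hcov k hk with ⟨p, hp, hpk⟩ | ⟨s, hss, _⟩
      · exact ⟨p, hp, hpk⟩
      · rw [hs2] at hss; exact absurd hss (by simp)
  | some s =>
    obtain ⟨b1, b2, b3, b4⟩ := hopen s hs2
    simp only
    constructor
    · intro p hp
      rw [List.mem_append] at hp
      rcases hp with hp | hp
      · obtain ⟨a1, a2, a3, a4, a5, a6⟩ := hsp p hp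
        exact ⟨a1, a2, by omega, a4, a5, Or.inr a6⟩
      · simp only [List.mem_singleton] at hp
        subst hp
        exact ⟨b1, by simp only [PySem.List.len_eq]; omega,
          by simp [PySem.List.len_eq], by simpa [PySem.List.len_eq] using b3,
          b4, Or.inl (by simp [PySem.List.len_eq])⟩
    · intro k hk
      rcases hcov k hk with ⟨p, hp, hpk⟩ | ⟨s', hss, hsk⟩
      · exact ⟨p, List.mem_append_left _ hp, hpk⟩
      · rw [hs2] at hss
        cases hss
        have hb := pvN_bounds _ _ hk
        exact ⟨(s, PySem.List.len cs), List.mem_append_right _ (by simp),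
          hsk, by simp only [PySem.List.len_eq]; omega⟩

-- pvBFind lemmas --------------------------------------------------------

theorem pvBFind_some (col : Int) (spans : List (Int × Int)) (s e : Int)
    (h : pvBFind col spans = some (s, e)) :
    (s, e) ∈ spans ∧ s ≤ col ∧ col < e := by
  induction spans with
  | nil => simp [pvBFind] at h
  | cons p rest ih =>
    obtain ⟨ps, pe⟩ := p
    simp only [pvBFind] at h
    split_ifs at h with hcond
    · cases h; exact ⟨List.mem_cons_self, hcond.1, hcond.2⟩
    · obtain ⟨h1, h2, h3⟩ := ih h
      exact ⟨List.mem_cons_of_mem _ h1, h2, h3⟩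

theorem pvBFind_none (col : Int) (spans : List (Int × Int))
    (h : pvBFind col spans = none) :
    ∀ p ∈ spans, ¬ (p.1 ≤ col ∧ col < p.2) := by
  induction spans with
  | nil => simp
  | cons p rest ih =>
    obtain ⟨ps, pe⟩ := p
    simp only [pvBFind] at h
    split_ifs at h with hcond
    · intro q hq
      rcases List.mem_cons.1 hq with rfl | hq'
      · exact hcond
      · exact ih h q hq'

-- endpoint identification ------------------------------------------------

theorem pvALeft_eq (cs : List Char) (col s e : Int) (hok : pvSpanOk cs (s, e))
    (h1 : s ≤ col) (h2 : col < e) : pvALeft cs (col - 1) = s - 1 := by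
  obtain ⟨a1, a2, a3, a4, a5, a6⟩ := hok
  dsimp only at a1 a2 a3 a4 a5 a6
  obtain ⟨l1, l2, l3⟩ := pvALeft_spec cs (col - 1)
  set r := pvALeft cs (col - 1) with hr
  by_contra hne
  rcases lt_or_gt_of_ne hne with hlt | hgt
  · -- r < s - 1: then s - 1 is in the all-true window, contradiction with maximality
    have hk := l2 (s - 1) (by omega) (by omega)
    rcases a5 with h | h
    · have := pvN_bounds cs (s - 1) hk; omega
    · rw [h] at hk; exact absurd hk (by simp)
  · -- r > s - 1: then r is inside the run, contradiction with stop condition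
    have hk := a4 r (by omega) (by omega)
    rw [l3] at hk; exact absurd hk (by simp)

theorem pvARight_eq (cs : List Char) (col s e : Int) (hok : pvSpanOk cs (s, e))
    (h1 : s ≤ col) (h2 : col < e) (h0 : 0 ≤ col) : pvARight cs (col + 1) = e := by
  obtain ⟨a1, a2, a3, a4, a5, a6⟩ := hok
  dsimp only at a1 a2 a3 a4 a5 a6
  obtain ⟨l1, l2, l3⟩ := pvARight_spec cs (col + 1)
  set r := pvARight cs (col + 1) with hr
  by_contra hne
  rcases lt_or_gt_of_ne hne with hlt | hgt
  · -- r < e: then r is inside the run, contradiction with stop condition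
    have hk := a4 r (by omega) (by omega)
    have := pvM_of_pvN cs r hk
    rw [l3] at this; exact absurd this (by simp)
  · -- r > e: then e is in the all-true window, contradiction with maximality
    have hk := l2 e (by omega) (by omega)
    have hkN := pvN_of_pvM cs e (by omega) hk
    rcases a6 with h | h
    · rw [h] at hkN
      rw [pvN_ge_false cs _ (le_refl _)] at hkN
      exact absurd hkN (by simp)
    · rw [h] at hkN; exact absurd hkN (by simp)

-- ===== VERDICT (by name: the statement is the Claim_ definition above) =====
theorem extract_cpp_identifier_spec : Claim_equal_extract_cpp_identifier := by
  intro l col _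
  unfold Spec_extract_cpp_identifier extract_cpp_identifier extract_cpp_identifier_alt
  set cs := l.toList with hcs
  obtain ⟨hok, hcov⟩ := pvSpans_spec cs
  set st := (PySem.List.enumerate cs 0).foldl pvBStep ([], none) with hst
  set spans := (match st.2 with
    | some s => st.1 ++ [(s, PySem.List.len cs)]
    | none => st.1) with hspans
  simp only
  split_ifs with hguard
  · -- A returns None; show B finds no span containing col
    cases hfind : pvBFind col spans with
    | none => simp
    | some p =>
      obtain ⟨ps, pe⟩ := p
      obtain ⟨hmem, hc1, hc2⟩ := pvBFind_some col spans ps pe hfind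
      obtain ⟨a1, a2, a3, a4, a5, a6⟩ := hok (ps, pe) hmem
      have hcolN := a4 col hc1 hc2
      have hb := pvN_bounds cs col hcolN
      simp only [pvN, Bool.and_eq_true, decide_eq_true_eq] at hcolN
      exfalso
      rcases hguard with h | h | h
      · omega
      · simp only [PySem.List.len_eq] at h; omega
      · exact h hcolN.2
  · -- A returns a slice; B finds the same span
    push Not at hguard
    obtain ⟨g1, g2, g3⟩ := hguard
    have hcolN : pvN cs col = true := by
      simp only [pvN, Bool.and_eq_true, decide_eq_true_eq]
      exact ⟨by omega, g3⟩
    obtain ⟨p, hmem, hp1, hp2⟩ := hcov col hcolN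
    cases hfind : pvBFind col spans with
    | none => exact absurd ⟨hp1, hp2⟩ (pvBFind_none col spans hfind p hmem)
    | some q =>
      obtain ⟨qs, qe⟩ := q
      obtain ⟨hqmem, hq1, hq2⟩ := pvBFind_some col spans qs qe hfind
      have hqok := hok (qs, qe) hqmem
      rw [pvALeft_eq cs col qs qe hqok hq1 hq2, pvARight_eq cs col qs qe hqok hq1 hq2 (by omega)]
      have : qs - 1 + 1 = qs := by ring
      rw [this]
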